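-- pv_equiv track=rewrite | github.com/colverz/Geant4-Agent | core/geometry/dialogue_registry.py | graph_dialogue_missing_paths
-- ===== SOURCE A (Python) =====
-- from typing import Iterable
--
-- _GROUPS_BY_SKELETON: dict[str, dict[str, tuple[str, ...]]] = {
--     "ring_modules": {
--         "geometry.ask.ring.module_size": ("module_x", "module_y", "module_z"),
--         "geometry.ask.ring.count": ("n",),
--         "geometry.ask.ring.radius": ("radius",),
--         "geometry.ask.ring.clearance": ("clearance",),
--     },
--     "grid_modules": {
--         "geometry.ask.grid.module_size": ("module_x", "module_y", "module_z"),
--         "geometry.ask.grid.count_x": ("nx",),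
--         "geometry.ask.grid.count_y": ("ny",),
--         "geometry.ask.grid.pitch_x": ("pitch_x",),
--         "geometry.ask.grid.pitch_y": ("pitch_y",),
--         "geometry.ask.grid.clearance": ("clearance",),
--     },
--     "nest_box_box": {
--         "geometry.ask.nest.parent_size": ("parent_x", "parent_y", "parent_z"),
--         "geometry.ask.nest.child_size": ("child_x", "child_y", "child_z"),
--         "geometry.ask.nest.clearance": ("clearance",),
--     },
--     "nest_box_tubs": {
--         "geometry.ask.nest.parent_size": ("parent_x", "parent_y", "parent_z"),
--         "geometry.ask.nest.child_radius": ("child_rmax",),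
--         "geometry.ask.nest.child_half_length": ("child_hz",),
--         "geometry.ask.nest.clearance": ("clearance",),
--     },
--     "stack_in_box": {
--         "geometry.ask.stack.footprint": ("stack_x", "stack_y"),
--         "geometry.ask.stack.thicknesses": ("t1", "t2", "t3"),
--         "geometry.ask.stack.layer_clearance": ("stack_clearance",),
--     },
--     "shell_nested": {
--         "geometry.ask.shell.inner_radius": ("inner_r",),
--         "geometry.ask.shell.thicknesses": ("th1", "th2", "th3"),
--         "geometry.ask.shell.half_length": ("hz",),
--     },
--     "boolean_union_boxes": {
--         "geometry.ask.boolean.solid_a_size": ("bool_a_x", "bool_a_y", "bool_a_z"),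
--         "geometry.ask.boolean.solid_b_size": ("bool_b_x", "bool_b_y", "bool_b_z"),
--     },
--     "boolean_subtraction_boxes": {
--         "geometry.ask.boolean.solid_a_size": ("bool_a_x", "bool_a_y", "bool_a_z"),
--         "geometry.ask.boolean.solid_b_size": ("bool_b_x", "bool_b_y", "bool_b_z"),
--     },
--     "boolean_intersection_boxes": {
--         "geometry.ask.boolean.solid_a_size": ("bool_a_x", "bool_a_y", "bool_a_z"),
--         "geometry.ask.boolean.solid_b_size": ("bool_b_x", "bool_b_y", "bool_b_z"),
--     },
-- }
--
-- def graph_dialogue_missing_paths(chosen_skeleton: str | None, missing_params: Iterable[str]) -> list[str]: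
--     skeleton = str(chosen_skeleton or "").strip()
--     missing = {str(item).strip() for item in missing_params if str(item).strip()}
--     if not skeleton or not missing:
--         return []
--     groups = _GROUPS_BY_SKELETON.get(skeleton, {})
--     if not groups:
--         return [f"geometry.params.{name}" for name in sorted(missing)]
--
--     out: list[str] = []
--     covered: set[str] = set()
--     for dialogue_path, param_names in groups.items():
--         if any(name in missing for name in param_names):
--             out.append(dialogue_path)
--             covered.update(name for name in param_names if name in missing)
--     for name in sorted(missing - covered):
--         out.append(f"geometry.params.{name}")
--     return out
-- ===== SOURCE B (Python) =====
-- _GROUPS_BY_SKELETON = {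
--     "ring_modules": {
--         "geometry.ask.ring.module_size": ("module_x", "module_y", "module_z"),
--         "geometry.ask.ring.count": ("n",),
--         "geometry.ask.ring.radius": ("radius",),
--         "geometry.ask.ring.clearance": ("clearance",),
--     },
--     "grid_modules": {
--         "geometry.ask.grid.module_size": ("module_x", "module_y", "module_z"),
--         "geometry.ask.grid.count_x": ("nx",),
--         "geometry.ask.grid.count_y": ("ny",),
--         "geometry.ask.grid.pitch_x": ("pitch_x",),
--         "geometry.ask.grid.pitch_y": ("pitch_y",),
--         "geometry.ask.grid.clearance": ("clearance",),
--     },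
--     "nest_box_box": {
--         "geometry.ask.nest.parent_size": ("parent_x", "parent_y", "parent_z"),
--         "geometry.ask.nest.child_size": ("child_x", "child_y", "child_z"),
--         "geometry.ask.nest.clearance": ("clearance",),
--     },
--     "nest_box_tubs": {
--         "geometry.ask.nest.parent_size": ("parent_x", "parent_y", "parent_z"),
--         "geometry.ask.nest.child_radius": ("child_rmax",),
--         "geometry.ask.nest.child_half_length": ("child_hz",),
--         "geometry.ask.nest.clearance": ("clearance",),
--     },
--     "stack_in_box": {
--         "geometry.ask.stack.footprint": ("stack_x", "stack_y"),
--         "geometry.ask.stack.thicknesses": ("t1", "t2", "t3"),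
--         "geometry.ask.stack.layer_clearance": ("stack_clearance",),
--     },
--     "shell_nested": {
--         "geometry.ask.shell.inner_radius": ("inner_r",),
--         "geometry.ask.shell.thicknesses": ("th1", "th2", "th3"),
--         "geometry.ask.shell.half_length": ("hz",),
--     },
--     "boolean_union_boxes": {
--         "geometry.ask.boolean.solid_a_size": ("bool_a_x", "bool_a_y", "bool_a_z"),
--         "geometry.ask.boolean.solid_b_size": ("bool_b_x", "bool_b_y", "bool_b_z"),
--     },
--     "boolean_subtraction_boxes": {
--         "geometry.ask.boolean.solid_a_size": ("bool_a_x", "bool_a_y", "bool_a_z"),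
--         "geometry.ask.boolean.solid_b_size": ("bool_b_x", "bool_b_y", "bool_b_z"),
--     },
--     "boolean_intersection_boxes": {
--         "geometry.ask.boolean.solid_a_size": ("bool_a_x", "bool_a_y", "bool_a_z"),
--         "geometry.ask.boolean.solid_b_size": ("bool_b_x", "bool_b_y", "bool_b_z"),
--     },
-- }
--
-- # Inverted index, built once: per skeleton, param name -> (group insertion index, dialogue path).
-- _PARAM_INDEX = {
--     skel: {
--         name: (i, path)
--         for i, (path, names) in enumerate(groups.items())
--         for name in names
--     }
--     for skel, groups in _GROUPS_BY_SKELETON.items()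
-- }
--
--
-- def graph_dialogue_missing_paths(chosen_skeleton, missing_params):
--     skeleton = str(chosen_skeleton or "").strip()
--     missing = {str(item).strip() for item in missing_params if str(item).strip()}
--     if not skeleton or not missing:
--         return []
--     index = _PARAM_INDEX.get(skeleton)
--     if index is None:
--         return [f"geometry.params.{name}" for name in sorted(missing)]
--     triggered = {}  # group index -> dialogue path
--     leftovers = []
--     for name in missing:
--         hit = index.get(name)
--         if hit is None:
--             leftovers.append(name)
--         else:
--             triggered[hit[0]] = hit[1]
--     out = [triggered[i] for i in sorted(triggered)]
--     out.extend(f"geometry.params.{name}" for name in sorted(leftovers))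
--     return out
-- ===== Notes on version B (the rewrite author's own statement) =====
-- stated objective: alternative
-- what changed: B precomputes a per-skeleton inverted index (param name -> (group insertion index, dialogue path)) and iterates over the missing params, looking each up and sorting the hit group indices to restore A's group order, instead of A's scan over every dialogue group testing each group's params against the missing set.
import Mathlib
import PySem

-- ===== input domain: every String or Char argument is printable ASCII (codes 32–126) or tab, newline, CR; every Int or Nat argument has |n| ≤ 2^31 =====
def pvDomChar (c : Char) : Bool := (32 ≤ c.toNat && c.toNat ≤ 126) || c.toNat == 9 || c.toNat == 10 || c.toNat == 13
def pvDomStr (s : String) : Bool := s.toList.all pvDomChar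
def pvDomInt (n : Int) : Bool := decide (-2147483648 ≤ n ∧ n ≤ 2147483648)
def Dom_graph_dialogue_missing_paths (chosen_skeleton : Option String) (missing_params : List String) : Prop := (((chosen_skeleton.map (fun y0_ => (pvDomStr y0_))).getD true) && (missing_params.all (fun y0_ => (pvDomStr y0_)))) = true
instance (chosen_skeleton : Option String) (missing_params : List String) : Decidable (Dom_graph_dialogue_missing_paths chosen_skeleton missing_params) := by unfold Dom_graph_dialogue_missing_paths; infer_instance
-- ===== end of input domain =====

-- B replaces A's scan over the skeleton's dialogue groups by a precomputed inverted
-- index (param name -> (group index, dialogue path)) and iterates over the missing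
-- params instead, sorting the hit group indices to restore group order (objective:
-- alternative/idiomatic; same observable results).

-- ===== PORT A =====
-- the module constant _GROUPS_BY_SKELETON (dicts as insertion-ordered association lists)
def pvGroupsBySkeleton : List (String × List (String × List String)) :=
  [ ("ring_modules",
      [ ("geometry.ask.ring.module_size", ["module_x", "module_y", "module_z"]),
        ("geometry.ask.ring.count", ["n"]),
        ("geometry.ask.ring.radius", ["radius"]),
        ("geometry.ask.ring.clearance", ["clearance"]) ]),
    ("grid_modules",
      [ ("geometry.ask.grid.module_size", ["module_x", "module_y", "module_z"]),
        ("geometry.ask.grid.count_x", ["nx"]),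
        ("geometry.ask.grid.count_y", ["ny"]),
        ("geometry.ask.grid.pitch_x", ["pitch_x"]),
        ("geometry.ask.grid.pitch_y", ["pitch_y"]),
        ("geometry.ask.grid.clearance", ["clearance"]) ]),
    ("nest_box_box",
      [ ("geometry.ask.nest.parent_size", ["parent_x", "parent_y", "parent_z"]),
        ("geometry.ask.nest.child_size", ["child_x", "child_y", "child_z"]),
        ("geometry.ask.nest.clearance", ["clearance"]) ]),
    ("nest_box_tubs",
      [ ("geometry.ask.nest.parent_size", ["parent_x", "parent_y", "parent_z"]),
        ("geometry.ask.nest.child_radius", ["child_rmax"]),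
        ("geometry.ask.nest.child_half_length", ["child_hz"]),
        ("geometry.ask.nest.clearance", ["clearance"]) ]),
    ("stack_in_box",
      [ ("geometry.ask.stack.footprint", ["stack_x", "stack_y"]),
        ("geometry.ask.stack.thicknesses", ["t1", "t2", "t3"]),
        ("geometry.ask.stack.layer_clearance", ["stack_clearance"]) ]),
    ("shell_nested",
      [ ("geometry.ask.shell.inner_radius", ["inner_r"]),
        ("geometry.ask.shell.thicknesses", ["th1", "th2", "th3"]),
        ("geometry.ask.shell.half_length", ["hz"]) ]),
    ("boolean_union_boxes",
      [ ("geometry.ask.boolean.solid_a_size", ["bool_a_x", "bool_a_y", "bool_a_z"]),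
        ("geometry.ask.boolean.solid_b_size", ["bool_b_x", "bool_b_y", "bool_b_z"]) ]),
    ("boolean_subtraction_boxes",
      [ ("geometry.ask.boolean.solid_a_size", ["bool_a_x", "bool_a_y", "bool_a_z"]),
        ("geometry.ask.boolean.solid_b_size", ["bool_b_x", "bool_b_y", "bool_b_z"]) ]),
    ("boolean_intersection_boxes",
      [ ("geometry.ask.boolean.solid_a_size", ["bool_a_x", "bool_a_y", "bool_a_z"]),
        ("geometry.ask.boolean.solid_b_size", ["bool_b_x", "bool_b_y", "bool_b_z"]) ]) ]

def graph_dialogue_missing_paths (chosen_skeleton : Option String) (missing_params : List String) : List String :=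
  let skeleton := PySem.Str.strip (chosen_skeleton.getD "")
  let missing : PySem.Set String :=
    PySem.Set.ofList (missing_params.filterMap (fun item =>
      let s := PySem.Str.strip item
      if s = "" then none else some s))
  if skeleton = "" ∨ missing = [] then []
  else
    let groups := ((PySem.Dict.mk pvGroupsBySkeleton).get? skeleton).getD []
    if groups = [] then
      (PySem.List.sorted missing (fun x => x) false).map (fun name => "geometry.params." ++ name)
    else
      let st := groups.foldl (fun (acc : List String × PySem.Set String) g =>
        if g.2.any (fun name => missing.contains name) then
          (acc.1 ++ [g.1], PySem.Set.update acc.2 (g.2.filter (fun name => missing.contains name)))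
        else acc) ([], PySem.Set.empty)
      st.1 ++ (PySem.List.sorted (PySem.Set.diff missing st.2) (fun x => x) false).map
        (fun name => "geometry.params." ++ name)

-- ===== PORT B =====
-- B's helper: the inverted index for one skeleton's groups (param -> (group index, path))
def pvIndexOfGroups (groups : List (String × List String)) : PySem.Dict String (Int × String) :=
  (PySem.List.enumerate groups 0).foldl
    (fun d ip => ip.2.2.foldl (fun d name => d.insert name (ip.1, ip.2.1)) d)
    PySem.Dict.empty

-- B's module constant _PARAM_INDEX, built once from the groups table
def pvParamIndex : List (String × PySem.Dict String (Int × String)) :=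
  pvGroupsBySkeleton.map (fun sk => (sk.1, pvIndexOfGroups sk.2))

def graph_dialogue_missing_paths_alt (chosen_skeleton : Option String) (missing_params : List String) : List String :=
  let skeleton := PySem.Str.strip (chosen_skeleton.getD "")
  let missing : PySem.Set String :=
    PySem.Set.ofList (missing_params.filterMap (fun item =>
      let s := PySem.Str.strip item
      if s = "" then none else some s))
  if skeleton = "" ∨ missing = [] then []
  else
    match (PySem.Dict.mk pvParamIndex).get? skeleton with
    | none =>
      (PySem.List.sorted missing (fun x => x) false).map (fun name => "geometry.params." ++ name)
    | some index =>
      let tl := missing.foldl (fun (acc : PySem.Dict Int String × List String) name =>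
        match index.get? name with
        | none => (acc.1, acc.2 ++ [name])
        | some hit => (acc.1.insert hit.1 hit.2, acc.2)) (PySem.Dict.empty, [])
      (PySem.List.sorted tl.1.keys (fun x => x) false).map (fun i => (tl.1.get? i).getD "")
        ++ (PySem.List.sorted tl.2 (fun x => x) false).map (fun name => "geometry.params." ++ name)

-- ===== PRECONDITION & SPEC =====
def Spec_graph_dialogue_missing_paths (chosen_skeleton : Option String) (missing_params : List String) (out : List String) : Prop := out = graph_dialogue_missing_paths_alt chosen_skeleton missing_params
instance (chosen_skeleton : Option String) (missing_params : List String) (out : List String) : Decidable (Spec_graph_dialogue_missing_paths chosen_skeleton missing_params out) := by unfold Spec_graph_dialogue_missing_paths; infer_instance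

-- ===== CLAIM (what is proved, stated in full; the proofs are below) =====
def Claim_equal_graph_dialogue_missing_paths : Prop := ∀ (chosen_skeleton : Option String) (missing_params : List String), Dom_graph_dialogue_missing_paths chosen_skeleton missing_params → Spec_graph_dialogue_missing_paths chosen_skeleton missing_params (graph_dialogue_missing_paths chosen_skeleton missing_params)

-- ===== LEMMAS AND PROOFS =====

-- default group used for index-based access
def pvDG : String × List String := ("", [])

-- the association list the inverted index of `groups` holds, with indices from i
def pvPairs : List (String × List String) → Int → List (String × (Int × String))
  | [], _ => []
  | g :: rest, i => g.2.map (fun n => (n, (i, g.1))) ++ pvPairs rest (i + 1)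

theorem pvPairs_keys (G : List (String × List String)) (i : Int) :
    (pvPairs G i).map (fun p => p.1) = G.flatMap (fun g => g.2) := by
  induction G generalizing i with
  | nil => rfl
  | cons g rest ih => simp [pvPairs, ih, List.map_map, Function.comp_def]

theorem pvMem_pairs (G : List (String × List String)) (i : Int) (n : String) (v : Int × String) :
    (n, v) ∈ pvPairs G i ↔
      ∃ j, j < G.length ∧ n ∈ (G.getD j pvDG).2 ∧ v = (i + (j : Int), (G.getD j pvDG).1) := by
  induction G generalizing i with
  | nil => simp [pvPairs]
  | cons g rest ih =>
    simp only [pvPairs, List.mem_append, List.mem_map, ih]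
    constructor
    · rintro (⟨a, ha, h⟩ | ⟨j, hj, hn, hv⟩)
      · obtain ⟨h1, h2⟩ := Prod.mk.injEq .. ▸ h
        exact ⟨0, by simp, by simpa [← h1] using ha, by simp [← h2]⟩
      · refine ⟨j + 1, by simpa using hj, by simpa using hn, ?_⟩
        simp only [List.getD_cons_succ] at *
        rw [hv]; congr 1; push_cast; ring
    · rintro ⟨j, hj, hn, hv⟩
      cases j with
      | zero => exact Or.inl ⟨n, by simpa using hn, by simp [hv]⟩
      | succ j =>
        refine Or.inr ⟨j, by simpa using hj, by simpa using hn, ?_⟩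
        simp only [List.getD_cons_succ] at *
        rw [hv]; congr 1; push_cast; ring

theorem pvIndex_items_aux (G : List (String × List String)) (i : Int)
    (d : PySem.Dict String (Int × String)) (hdn : d.keys.Nodup)
    (hfresh : ∀ n ∈ G.flatMap (fun g => g.2), d.contains n = false)
    (hnod : (G.flatMap (fun g => g.2)).Nodup) :
    ((PySem.List.enumerate G i).foldl
        (fun d ip => ip.2.2.foldl (fun d name => d.insert name (ip.1, ip.2.1)) d) d).items
      = d.items ++ pvPairs G i := by
  induction G generalizing i d with
  | nil => simp [PySem.List.enumerate_nil, pvPairs]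
  | cons g rest ih =>
    rw [List.flatMap_cons, List.nodup_append] at hnod
    obtain ⟨hg2, hrest, hdisj⟩ := hnod
    have hfg : ∀ n ∈ g.2, d.contains n = false := by
      intro n hn; exact hfresh n (by rw [List.flatMap_cons, List.mem_append]; exact Or.inl hn)
    have hfr : ∀ n ∈ rest.flatMap (fun g => g.2), d.contains n = false := by
      intro n hn; exact hfresh n (by rw [List.flatMap_cons, List.mem_append]; exact Or.inr hn)
    rw [PySem.List.enumerate_cons]
    simp only [List.foldl_cons]
    have hitems : (g.2.foldl (fun d name => d.insert name (i, g.1)) d).items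
        = d.items ++ g.2.map (fun n => (n, (i, g.1))) := by
      simpa using PySem.Dict.items_foldl_insert_fresh (g.2) (fun a => a)
        (fun _ => ((i : Int), g.1)) d hfg (by simpa using hg2)
    set d' := g.2.foldl (fun d name => d.insert name (i, g.1)) d with hd'
    have hkeys' : d'.keys = d.keys ++ g.2 := by
      simp only [PySem.Dict.keys, hitems]
      simp [List.map_map, Function.comp_def]
    have hnotmem : ∀ n ∈ g.2, n ∉ d.keys := by
      intro n hn hc
      rw [← PySem.Dict.contains_iff_mem_keys] at hc
      rw [hfg n hn] at hc; cases hc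
    have hnod' : d'.keys.Nodup := by
      rw [hkeys', List.nodup_append]
      exact ⟨hdn, hg2, fun a ha b hb hab => hnotmem b hb (hab ▸ ha)⟩
    have hfresh' : ∀ n ∈ rest.flatMap (fun g => g.2), d'.contains n = false := by
      intro n hn
      have h2 : n ∉ g.2 := fun hc => hdisj n hc n hn rfl
      have hmem : n ∉ d'.keys := by
        rw [hkeys', List.mem_append]
        rintro (h | h)
        · rw [← PySem.Dict.contains_iff_mem_keys, hfr n hn] at h; cases h
        · exact h2 h
      cases hcc : d'.contains n with
      | false => rfl
      | true => exact absurd ((PySem.Dict.contains_iff_mem_keys d' n).mp hcc) hmem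
    show ((PySem.List.enumerate rest (i + 1)).foldl
        (fun d ip => ip.2.2.foldl (fun d name => d.insert name (ip.1, ip.2.1)) d) d').items
      = d.items ++ pvPairs (g :: rest) i
    rw [ih (i + 1) d' hnod' hfresh' hrest, hitems, pvPairs, List.append_assoc]

theorem pvIndex_items (G : List (String × List String))
    (hnod : (G.flatMap (fun g => g.2)).Nodup) :
    (pvIndexOfGroups G).items = pvPairs G 0 := by
  unfold pvIndexOfGroups
  rw [pvIndex_items_aux G 0 PySem.Dict.empty (by simp [PySem.Dict.keys_empty])
    (fun n _ => PySem.Dict.contains_empty n) hnod]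
  rfl

theorem pvIndex_keys (G : List (String × List String))
    (hnod : (G.flatMap (fun g => g.2)).Nodup) :
    (pvIndexOfGroups G).keys = G.flatMap (fun g => g.2) := by
  simp only [PySem.Dict.keys, pvIndex_items G hnod, pvPairs_keys]

theorem pvIndex_get?_some (G : List (String × List String))
    (hnod : (G.flatMap (fun g => g.2)).Nodup) (n : String) (v : Int × String) :
    (pvIndexOfGroups G).get? n = some v ↔ (n, v) ∈ pvPairs G 0 := by
  rw [PySem.Dict.get?_eq_some_iff_mem_items (pvIndexOfGroups G) n v
    (by rw [pvIndex_keys G hnod]; exact hnod), pvIndex_items G hnod]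

theorem pvIndex_get?_none (G : List (String × List String))
    (hnod : (G.flatMap (fun g => g.2)).Nodup) (n : String) :
    (pvIndexOfGroups G).get? n = none ↔ n ∉ G.flatMap (fun g => g.2) := by
  rw [PySem.Dict.get?_eq_none_iff_not_mem_keys, pvIndex_keys G hnod]

-- A's loop over the groups, in closed form
theorem pvAfold (G : List (String × List String)) (m : PySem.Set String)
    (o : List String) (c : PySem.Set String) :
    G.foldl (fun (acc : List String × PySem.Set String) g =>
        if g.2.any (fun name => m.contains name) then
          (acc.1 ++ [g.1], PySem.Set.update acc.2 (g.2.filter (fun name => m.contains name)))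
        else acc) (o, c)
      = (o ++ (G.filter (fun g => g.2.any (fun name => m.contains name))).map (fun g => g.1),
         PySem.Set.update c (G.flatMap (fun g => g.2.filter (fun name => m.contains name)))) := by
  induction G generalizing o c with
  | nil => simp
  | cons g rest ih =>
    simp only [List.foldl_cons, List.flatMap_cons, PySem.Set.update_append]
    by_cases h : (g.2.any fun name => m.contains name) = true
    · rw [if_pos h, ih]
      have h2 : ∃ x ∈ g.2, x ∈ m := by simpa using h
      simp [h2]
    · have h' : (g.2.any fun name => m.contains name) = false := by
        rw [Bool.not_eq_true] at h; exact h
      have hemp : g.2.filter (fun name => m.contains name) = [] := by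
        rw [List.filter_eq_nil_iff]
        intro a ha hc
        rw [List.any_eq_false] at h'
        exact absurd hc (by simpa using h' a ha)
      rw [if_neg h, ih, hemp, PySem.Set.update_nil]
      have h2 : ¬ ∃ x ∈ g.2, x ∈ m := by simpa using h'
      simp [h2]

-- B's loop over the missing params, generic in the lookup function f
theorem pvBfold_snd (f : String → Option (Int × String)) (m : List String)
    (d : PySem.Dict Int String) (l : List String) :
    (m.foldl (fun (acc : PySem.Dict Int String × List String) name =>
        match f name with
        | none => (acc.1, acc.2 ++ [name])
        | some hit => (acc.1.insert hit.1 hit.2, acc.2)) (d, l)).2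
      = l ++ m.filter (fun n => (f n).isNone) := by
  induction m generalizing d l with
  | nil => simp
  | cons n rest ih =>
    simp only [List.foldl_cons, List.filter_cons]
    cases hf : f n with
    | none => simp [ih]
    | some hit => simp [ih]

theorem pvBfold_keys_mem (f : String → Option (Int × String)) (m : List String)
    (d : PySem.Dict Int String) (l : List String) (i : Int) :
    i ∈ (m.foldl (fun (acc : PySem.Dict Int String × List String) name =>
        match f name with
        | none => (acc.1, acc.2 ++ [name])
        | some hit => (acc.1.insert hit.1 hit.2, acc.2)) (d, l)).1.keys
      ↔ i ∈ d.keys ∨ ∃ n ∈ m, ∃ p, f n = some (i, p) := by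
  induction m generalizing d l with
  | nil => simp
  | cons n rest ih =>
    simp only [List.foldl_cons]
    cases hf : f n with
    | none =>
      rw [ih]
      constructor
      · rintro (h | ⟨a, ha, hp⟩)
        · exact Or.inl h
        · exact Or.inr ⟨a, List.mem_cons_of_mem _ ha, hp⟩
      · rintro (h | ⟨a, ha, p, hp⟩)
        · exact Or.inl h
        · rcases List.mem_cons.mp ha with rfl | ha
          · rw [hf] at hp; cases hp
          · exact Or.inr ⟨a, ha, p, hp⟩
    | some hit =>
      rw [ih]
      simp only [PySem.Dict.mem_keys_insert]
      constructor
      · rintro ((rfl | h) | ⟨a, ha, hp⟩)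
        · exact Or.inr ⟨n, List.mem_cons_self .., hit.2, by rw [hf]⟩
        · exact Or.inl h
        · exact Or.inr ⟨a, List.mem_cons_of_mem _ ha, hp⟩
      · rintro (h | ⟨a, ha, p, hp⟩)
        · exact Or.inl (Or.inr h)
        · rcases List.mem_cons.mp ha with rfl | ha
          · rw [hf] at hp
            exact Or.inl (Or.inl (by cases hp; rfl))
          · exact Or.inr ⟨a, ha, p, hp⟩

theorem pvBfold_keys_nodup (f : String → Option (Int × String)) (m : List String)
    (d : PySem.Dict Int String) (l : List String) (hd : d.keys.Nodup) :
    (m.foldl (fun (acc : PySem.Dict Int String × List String) name =>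
        match f name with
        | none => (acc.1, acc.2 ++ [name])
        | some hit => (acc.1.insert hit.1 hit.2, acc.2)) (d, l)).1.keys.Nodup := by
  induction m generalizing d l with
  | nil => exact hd
  | cons n rest ih =>
    simp only [List.foldl_cons]
    cases hf : f n with
    | none => exact ih d (l ++ [n]) hd
    | some hit => exact ih _ l (PySem.Dict.nodup_keys_insert d hit.1 hit.2 hd)

theorem pvBfold_get?_val (f : String → Option (Int × String)) (v : Int → String)
    (hf : ∀ n i p, f n = some (i, p) → p = v i) (m : List String)
    (d : PySem.Dict Int String) (l : List String)
    (hd : ∀ i p, d.get? i = some p → p = v i) :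
    ∀ i p, (m.foldl (fun (acc : PySem.Dict Int String × List String) name =>
        match f name with
        | none => (acc.1, acc.2 ++ [name])
        | some hit => (acc.1.insert hit.1 hit.2, acc.2)) (d, l)).1.get? i = some p → p = v i := by
  induction m generalizing d l with
  | nil => exact hd
  | cons n rest ih =>
    simp only [List.foldl_cons]
    cases hfn : f n with
    | none => exact ih d (l ++ [n]) hd
    | some hit =>
      refine ih _ l ?_
      intro i p hget
      rw [PySem.Dict.get?_insert] at hget
      split_ifs at hget with hik
      · have hp : p = hit.2 := (Option.some_inj.mp hget).symm
        subst hp; subst hik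
        exact hf n hit.1 hit.2 (by rw [hfn])
      · exact hd i p hget

-- a filter-map over a list rewritten through indices into the list
theorem pvFilter_map_range {α β : Type} (l : List α) (p : α → Bool) (d : α) (f : α → β) :
    (l.filter p).map f
      = ((List.range l.length).filter (fun j => p (l.getD j d))).map (fun j => f (l.getD j d)) := by
  induction l with
  | nil => simp
  | cons a l ih =>
    simp only [List.length_cons, List.range_succ_eq_map, List.filter_cons, List.getD_cons_zero]
    by_cases h : p a = true <;>
      simp [h, List.filter_map, Function.comp_def, List.map_map, ih]

-- get? through a dict whose values were mapped entrywise
theorem pvGet?_mk_map {α β : Type} (l : List (String × α)) (h : α → β) (k : String) :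
    (PySem.Dict.mk (l.map (fun sk => (sk.1, h sk.2)))).get? k
      = ((PySem.Dict.mk l).get? k).map h := by
  induction l with
  | nil => rfl
  | cons a l ih =>
    obtain ⟨k1, v1⟩ := a
    simp only [List.map_cons, PySem.Dict.get?_mk_cons]
    by_cases hk : (k1 == k) = true <;> simp [hk, ih]

-- the main per-skeleton equation: A's group scan = B's inverted-index pass
theorem pvMain (G : List (String × List String))
    (hnod : (G.flatMap (fun g => g.2)).Nodup) (m : PySem.Set String) (hm : m.Nodup) :
    (G.foldl (fun (acc : List String × PySem.Set String) g =>
        if g.2.any (fun name => m.contains name) then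
          (acc.1 ++ [g.1], PySem.Set.update acc.2 (g.2.filter (fun name => m.contains name)))
        else acc) ([], PySem.Set.empty)).1
      ++ (PySem.List.sorted (PySem.Set.diff m
            (G.foldl (fun (acc : List String × PySem.Set String) g =>
              if g.2.any (fun name => m.contains name) then
                (acc.1 ++ [g.1], PySem.Set.update acc.2 (g.2.filter (fun name => m.contains name)))
              else acc) ([], PySem.Set.empty)).2) (fun x => x) false).map
          (fun name => "geometry.params." ++ name)
      = (PySem.List.sorted (m.foldl (fun (acc : PySem.Dict Int String × List String) name =>
            match (pvIndexOfGroups G).get? name with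
            | none => (acc.1, acc.2 ++ [name])
            | some hit => (acc.1.insert hit.1 hit.2, acc.2)) (PySem.Dict.empty, [])).1.keys
            (fun x => x) false).map
          (fun i => (((m.foldl (fun (acc : PySem.Dict Int String × List String) name =>
            match (pvIndexOfGroups G).get? name with
            | none => (acc.1, acc.2 ++ [name])
            | some hit => (acc.1.insert hit.1 hit.2, acc.2)) (PySem.Dict.empty, [])).1).get? i).getD "")
        ++ (PySem.List.sorted ((m.foldl (fun (acc : PySem.Dict Int String × List String) name =>
            match (pvIndexOfGroups G).get? name with
            | none => (acc.1, acc.2 ++ [name])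
            | some hit => (acc.1.insert hit.1 hit.2, acc.2)) (PySem.Dict.empty, [])).2)
            (fun x => x) false).map (fun name => "geometry.params." ++ name) := by
  rw [pvAfold G m [] PySem.Set.empty]
  rw [pvBfold_snd (fun n => (pvIndexOfGroups G).get? n) m PySem.Dict.empty []]
  set tl1 := (m.foldl (fun (acc : PySem.Dict Int String × List String) name =>
      match (pvIndexOfGroups G).get? name with
      | none => (acc.1, acc.2 ++ [name])
      | some hit => (acc.1.insert hit.1 hit.2, acc.2)) (PySem.Dict.empty, [])).1 with htl1
  -- characterisation of tl1's keys
  have hkeysnd : tl1.keys.Nodup := by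
    rw [htl1]
    exact pvBfold_keys_nodup _ m PySem.Dict.empty [] (by rw [PySem.Dict.keys_empty]; exact List.nodup_nil)
  have hmemkeys : ∀ i : Int, i ∈ tl1.keys ↔
      ∃ j, j < G.length ∧ i = (j : Int) ∧ ∃ n ∈ m, n ∈ (G.getD j pvDG).2 := by
    intro i
    rw [htl1, pvBfold_keys_mem]
    rw [PySem.Dict.keys_empty]
    simp only [List.not_mem_nil, false_or]
    constructor
    · rintro ⟨n, hn, p, hp⟩
      rw [pvIndex_get?_some G hnod, pvMem_pairs] at hp
      obtain ⟨j, hj, hnj, hv⟩ := hp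
      obtain ⟨h1, h2⟩ := Prod.mk.injEq .. ▸ hv
      exact ⟨j, hj, by simpa using h1, n, hn, hnj⟩
    · rintro ⟨j, hj, rfl, n, hn, hnj⟩
      refine ⟨n, hn, (G.getD j pvDG).1, ?_⟩
      rw [pvIndex_get?_some G hnod, pvMem_pairs]
      exact ⟨j, hj, hnj, by simp⟩
  -- the strictly increasing list of triggered group indices
  have hinj : Function.Injective Int.ofNat := fun a b h => Int.ofNat_inj.mp h
  have hsortedkeys : PySem.List.sorted tl1.keys (fun x => x) false
      = ((List.range G.length).filter
          (fun j => (G.getD j pvDG).2.any (fun name => m.contains name))).map Int.ofNat := by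
    apply PySem.List.sorted_eq_of_perm_of_pairwise_lt
    · rw [List.perm_ext_iff_of_nodup
        (List.Nodup.map hinj (List.Nodup.filter _ List.nodup_range)) hkeysnd]
      intro i
      rw [hmemkeys]
      simp only [List.mem_map, List.mem_filter, List.mem_range, List.any_eq_true]
      constructor
      · rintro ⟨j, ⟨hj, n, hn, hnm⟩, rfl⟩
        exact ⟨j, hj, rfl, n, by simpa using hnm, hn⟩
      · rintro ⟨j, hj, rfl, n, hn, hnj⟩
        exact ⟨j, ⟨hj, n, hnj, by simpa using hn⟩, rfl⟩
    · refine List.Pairwise.map _ ?_ (List.Pairwise.filter _ List.pairwise_lt_range)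
      intro a b h
      exact Int.ofNat_lt.mpr h
  rw [hsortedkeys]
  -- values at triggered indices are the group paths
  have hval : ∀ i p, tl1.get? i = some p → p = (G.getD i.toNat pvDG).1 := by
    rw [htl1]
    refine pvBfold_get?_val _ (fun i => (G.getD i.toNat pvDG).1) ?_ m PySem.Dict.empty []
      (by intro i p h; rw [PySem.Dict.get?_empty] at h; cases h)
    intro n i p hp
    rw [pvIndex_get?_some G hnod, pvMem_pairs] at hp
    obtain ⟨j, hj, hnj, hv⟩ := hp
    obtain ⟨h1, h2⟩ := Prod.mk.injEq .. ▸ hv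
    show p = (G.getD i.toNat pvDG).1
    subst h1
    rw [h2]
    simp
  have hchunk1 : (((List.range G.length).filter
        (fun j => (G.getD j pvDG).2.any (fun name => m.contains name))).map Int.ofNat).map
          (fun i => (tl1.get? i).getD "")
      = (G.filter (fun g => g.2.any (fun name => m.contains name))).map (fun g => g.1) := by
    rw [pvFilter_map_range G (fun g => g.2.any (fun name => m.contains name)) pvDG (fun g => g.1),
      List.map_map]
    apply List.map_congr_left
    intro j hj
    rw [List.mem_filter, List.mem_range] at hj
    have hmemk : Int.ofNat j ∈ tl1.keys := by
      rw [hmemkeys]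
      obtain ⟨n, hn, hnm⟩ := List.any_eq_true.mp hj.2
      exact ⟨j, hj.1, rfl, n, by simpa using hnm, hn⟩
    show (tl1.get? (Int.ofNat j)).getD "" = (G.getD j pvDG).1
    cases hg : tl1.get? (Int.ofNat j) with
    | none => exact absurd ((PySem.Dict.get?_eq_none_iff_not_mem_keys tl1 _).mp hg) (by simpa using hmemk)
    | some p =>
      have := hval _ _ hg
      simp [this]
  rw [hchunk1]
  simp only [List.nil_append]
  congr 1
  -- leftover params: same set, hence the same sorted list
  congr 1
  apply PySem.List.sorted_eq_sorted_of_perm _ _ (fun x => x) (fun a b h => h)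
  rw [List.perm_ext_iff_of_nodup (PySem.Set.nodup_diff _ _ hm) (List.Nodup.filter _ hm)]
  intro n
  rw [PySem.Set.mem_diff, List.mem_filter]
  simp only [PySem.Set.mem_update]
  constructor
  · rintro ⟨hn, hnc⟩
    refine ⟨hn, ?_⟩
    rw [Option.isNone_iff_eq_none, pvIndex_get?_none G hnod]
    intro hflat
    apply hnc
    right
    rw [List.mem_flatMap] at hflat ⊢
    obtain ⟨g, hg, hng⟩ := hflat
    exact ⟨g, hg, List.mem_filter.mpr ⟨hng, by simpa using hn⟩⟩
  · rintro ⟨hn, hnone⟩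
    rw [Option.isNone_iff_eq_none, pvIndex_get?_none G hnod] at hnone
    refine ⟨hn, ?_⟩
    rintro (h | h)
    · simp at h
    · apply hnone
      rw [List.mem_flatMap] at h ⊢
      obtain ⟨g, hg, hng⟩ := h
      exact ⟨g, hg, (List.mem_filter.mp hng).1⟩

theorem pvTop (cs : Option String) (mp : List String) :
    graph_dialogue_missing_paths cs mp = graph_dialogue_missing_paths_alt cs mp := by
  have hm : (PySem.Set.ofList (mp.filterMap (fun item =>
      let s := PySem.Str.strip item
      if s = "" then none else some s)) : List String).Nodup := PySem.Set.nodup_ofList _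
  simp only [graph_dialogue_missing_paths, graph_dialogue_missing_paths_alt]
  generalize hsk : PySem.Str.strip (cs.getD "") = sk
  generalize hms : (PySem.Set.ofList (mp.filterMap (fun item =>
      let s := PySem.Str.strip item
      if s = "" then none else some s)) : PySem.Set String) = m
  rw [hms] at hm
  by_cases h0 : sk = "" ∨ m = []
  · rw [if_pos h0, if_pos h0]
  rw [if_neg h0, if_neg h0]
  have hmap : (PySem.Dict.mk pvParamIndex).get? sk
      = ((PySem.Dict.mk pvGroupsBySkeleton).get? sk).map pvIndexOfGroups := by
    rw [show pvParamIndex = pvGroupsBySkeleton.map (fun sk => (sk.1, pvIndexOfGroups sk.2)) from rfl]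
    exact pvGet?_mk_map pvGroupsBySkeleton pvIndexOfGroups sk
  rw [hmap]
  cases hq : (PySem.Dict.mk pvGroupsBySkeleton).get? sk with
  | none => simp
  | some G =>
    have hmemG : (sk, G) ∈ pvGroupsBySkeleton :=
      PySem.Dict.mem_items_of_get?_eq_some _ hq
    have hprops : G ≠ [] ∧ (G.flatMap (fun g => g.2)).Nodup := by
      simp only [pvGroupsBySkeleton, List.mem_cons, List.not_mem_nil, or_false, Prod.mk.injEq] at hmemG
      rcases hmemG with ⟨-, h⟩|⟨-, h⟩|⟨-, h⟩|⟨-, h⟩|⟨-, h⟩|⟨-, h⟩|⟨-, h⟩|⟨-, h⟩|⟨-, h⟩ <;>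
        (rw [h]; exact ⟨by decide, by decide⟩)
    simp only [Option.map_some, Option.getD_some]
    rw [if_neg hprops.1]
    exact pvMain G hprops.2 m hm

-- ===== VERDICT (by name: the statement is the Claim_ definition above) =====
theorem graph_dialogue_missing_paths_spec : Claim_equal_graph_dialogue_missing_paths := by
  intro cs mp _
  unfold Spec_graph_dialogue_missing_paths
  exact pvTop cs mp
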